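-- pv_equiv track=rewrite | github.com/AllenXiao1230/code | ground_station/state_machine.py | decode_error
-- ===== SOURCE A (Python) =====
-- from enum import IntEnum
--
-- class ErrorBit(IntEnum):
--     NONE = 0
--     LORA_INIT = 1 << 0
--     SD_INIT = 1 << 1
--     RTC_INIT = 1 << 2
--     BARO_INIT = 1 << 3
--     IMU_INIT = 1 << 4
--     ADXL_INIT = 1 << 5
--     GPS_NO_FIX = 1 << 6
--     BATTERY = 1 << 7
--
-- def decode_error(err: int) -> str:
--     if err is None:
--         return "OK"
--     if err == 0:
--         return "OK"
--
--     codes = [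
--         (ErrorBit.LORA_INIT, "LORA"),
--         (ErrorBit.SD_INIT, "SD"),
--         (ErrorBit.RTC_INIT, "RTC"),
--         (ErrorBit.BARO_INIT, "BARO"),
--         (ErrorBit.IMU_INIT, "IMU"),
--         (ErrorBit.ADXL_INIT, "ADXL"),
--         (ErrorBit.GPS_NO_FIX, "GPS"),
--         (ErrorBit.BATTERY, "BAT"),
--     ]
--     labels = [label for bit, label in codes if err & int(bit)]
--     if not labels:
--         return f"ERR:0x{err:02X}"
--     return " | ".join(labels)
-- ===== SOURCE B (Python) =====
-- _TABLE = {1 << i: lab for i, lab in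
--           enumerate(["LORA", "SD", "RTC", "BARO", "IMU", "ADXL", "GPS", "BAT"])}
--
-- def decode_error(err: int) -> str:
--     if not err:
--         return "OK"
--     labels = []
--     rem = err & 0xFF
--     while rem:
--         low = rem & -rem        # lowest set bit
--         rem &= rem - 1          # clear it
--         labels.append(_TABLE[low])
--     if not labels:
--         return f"ERR:0x{err:02X}"
--     return " | ".join(labels)
-- ===== Notes on version B (the rewrite author's own statement) =====
-- stated objective: alternative
-- what changed: B replaces A's filter over a fixed 8-entry (bit,label) list with a bit->label dict and a loop that walks only the set bits of err & 0xFF (low = rem & -rem; rem &= rem - 1), appending each bit's label in ascending order.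
import Mathlib
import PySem

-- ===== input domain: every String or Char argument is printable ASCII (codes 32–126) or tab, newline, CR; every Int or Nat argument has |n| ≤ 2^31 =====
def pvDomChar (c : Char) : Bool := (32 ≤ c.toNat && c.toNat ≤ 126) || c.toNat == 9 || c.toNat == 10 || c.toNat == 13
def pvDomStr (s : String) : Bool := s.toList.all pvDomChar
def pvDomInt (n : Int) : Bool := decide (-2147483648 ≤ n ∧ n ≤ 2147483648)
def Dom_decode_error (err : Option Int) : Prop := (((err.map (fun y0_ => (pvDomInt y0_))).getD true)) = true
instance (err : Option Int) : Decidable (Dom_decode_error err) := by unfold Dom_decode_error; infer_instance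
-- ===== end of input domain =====

-- B re-implements the decoder by walking the set bits of err & 0xFF with a bit-trick loop
-- and a bit→label table instead of filtering a fixed 8-entry list (objective: alternative).

-- shared hand-port of the f-string `f"ERR:0x{err:02X}"` (both Pythons contain the identical
-- f-string); exact for every int: uppercase hex, zero-padded to width 2, '-' counted in the width.
def hexDigit (n : Nat) : Char := "0123456789ABCDEF".toList.getD n '0'

def hexChars (n : Nat) : List Char :=
  if _h : n < 16 then [hexDigit n]
  else hexChars (n / 16) ++ [hexDigit (n % 16)]
  decreasing_by exact Nat.div_lt_self (by omega) (by norm_num)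

def pyFmt02X (n : Int) : String :=
  if n < 0 then "-" ++ String.ofList (hexChars n.natAbs)
  else if n.natAbs < 16 then "0" ++ String.ofList (hexChars n.natAbs)
  else String.ofList (hexChars n.natAbs)

-- ===== PORT A =====
def decode_error (err : Option Int) : String :=
  match err with
  | none => "OK"
  | some e =>
    if e = 0 then "OK"
    else
      let codes : List (Int × String) :=
        [(1, "LORA"), (2, "SD"), (4, "RTC"), (8, "BARO"),
         (16, "IMU"), (32, "ADXL"), (64, "GPS"), (128, "BAT")]
      let labels := codes.filterMap
        (fun bl => if PySem.Int.band e bl.1 ≠ 0 then some bl.2 else none)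
      if labels = [] then "ERR:0x" ++ pyFmt02X e
      else PySem.Str.join " | " labels

-- ===== PORT B =====
-- module-level _TABLE = {1 << i: lab for …}
def errTable : PySem.Dict Int String :=
  PySem.Dict.ofList
    [(1, "LORA"), (2, "SD"), (4, "RTC"), (8, "BARO"),
     (16, "IMU"), (32, "ADXL"), (64, "GPS"), (128, "BAT")]

-- the `while rem:` loop; rem = err & 0xFF has at most 8 set bits and the loop clears one
-- per iteration, so fuel 8 always suffices (fuel is a totality guard only).
-- `_TABLE[low]` never raises in B (low is a power of two ≤ 128); ported as getD with a dummy default.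
def bLoop : Nat → Int → List String → List String
  | 0, _, acc => acc
  | fuel + 1, rem, acc =>
    if rem ≠ 0 then
      bLoop fuel (PySem.Int.band rem (rem - 1))
        (acc ++ [PySem.Dict.getD errTable (PySem.Int.band rem (-rem)) ""])
    else acc

def decode_error_alt (err : Option Int) : String :=
  match err with
  | none => "OK"
  | some e =>
    if e = 0 then "OK"
    else
      let labels := bLoop 8 (PySem.Int.band e 255) []
      if labels = [] then "ERR:0x" ++ pyFmt02X e
      else PySem.Str.join " | " labels

-- ===== PRECONDITION & SPEC =====
def Spec_decode_error (err : Option Int) (out : String) : Prop := out = decode_error_alt err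
instance (err : Option Int) (out : String) : Decidable (Spec_decode_error err out) := by unfold Spec_decode_error; infer_instance

-- ===== CLAIM (what is proved, stated in full; the proofs are below) =====
def Claim_equal_decode_error : Prop := ∀ (err : Option Int), Dom_decode_error err → Spec_decode_error err (decode_error err)

-- ===== LEMMAS AND PROOFS =====

-- masking by 255 does not change AND with anything below 256
theorem land_mask (n b : Nat) (hb : b < 256) : (n &&& 255) &&& b = n &&& b := by
  apply Nat.eq_of_testBit_eq
  intro i
  simp only [Nat.testBit_and]
  by_cases h : i < 8
  · have : (255 : Nat).testBit i = true := by
      have := Nat.testBit_two_pow_sub_one 8 i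
      norm_num at this
      simp [this, h]
    simp [this]
  · have : b.testBit i = false := by
      apply Nat.testBit_lt_two_pow
      calc b < 256 := hb
        _ ≤ 2 ^ i := by
          have : (256 : Nat) = 2 ^ 8 := by norm_num
          rw [this]; exact Nat.pow_le_pow_right (by norm_num) (by omega)
    simp [this]

theorem land_255_small (x : Nat) : x &&& 255 = x % 256 := by
  have := Nat.and_two_pow_sub_one_eq_mod x 8
  norm_num at this
  exact this

-- the bit-fiddling fact needed in the negative case, checked exhaustively
set_option maxRecDepth 40000 in
theorem neg_case_bits : ∀ j : Fin 256, ∀ i : Fin 8,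
    (2 ^ i.val - (2 ^ i.val &&& j.val) : Nat) = (255 - j.val) &&& 2 ^ i.val := by decide

-- negative-operand evaluation of band with a Nat right operand
theorem band_neg_eval (e : Int) (he : ¬ 0 ≤ e) (b : Nat) :
    PySem.Int.band e (b : Int) = ((b - (b &&& (-e - 1).toNat) : Nat) : Int) := by
  unfold PySem.Int.band
  simp [he]

-- reduction: the AND with 255 and all eight bit tests only depend on a residue k < 256
theorem band_reduce (e : Int) : ∃ k : Nat, k < 256 ∧ PySem.Int.band e 255 = (k : Int) ∧
    ∀ i : Fin 8, PySem.Int.band e ((2 ^ i.val : Nat) : Int)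
      = PySem.Int.band (k : Int) ((2 ^ i.val : Nat) : Int) := by
  by_cases he : 0 ≤ e
  · refine ⟨e.toNat % 256, Nat.mod_lt _ (by norm_num), ?_, ?_⟩
    · have h := PySem.Int.band_of_nonneg he (show (0:Int) ≤ 255 by norm_num)
      rw [h, show Int.toNat 255 = 255 from rfl, land_255_small]
    · intro i
      have h1 := PySem.Int.band_of_nonneg he (show (0:Int) ≤ ((2 ^ i.val : Nat) : Int) by positivity)
      have h2 := PySem.Int.band_natCast (e.toNat % 256) (2 ^ i.val)
      rw [h1, h2, Int.toNat_natCast]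
      have hp : (2 ^ i.val : Nat) < 256 := by
        have : i.val < 8 := i.isLt
        calc (2 ^ i.val : Nat) < 2 ^ 8 := Nat.pow_lt_pow_right (by norm_num) (by omega)
          _ = 256 := by norm_num
      rw [← land_255_small, land_mask _ _ hp]
  · refine ⟨255 - (-e - 1).toNat % 256, by omega, ?_, ?_⟩
    · have h : PySem.Int.band e 255 = ((255 - (255 &&& (-e - 1).toNat) : Nat) : Int) :=
        band_neg_eval e he 255
      rw [h, Nat.and_comm, land_255_small]
    · intro i
      have h1 := band_neg_eval e he (2 ^ i.val)
      have h2 := PySem.Int.band_natCast (255 - (-e - 1).toNat % 256) (2 ^ i.val)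
      rw [h1, h2]
      congr 1
      have hlt : (2 ^ i.val : Nat) < 256 := by
        have : i.val < 8 := i.isLt
        calc (2 ^ i.val : Nat) < 2 ^ 8 := Nat.pow_lt_pow_right (by norm_num) (by omega)
          _ = 256 := by norm_num
      have hm : (2 ^ i.val) &&& (-e - 1).toNat = (2 ^ i.val) &&& ((-e - 1).toNat % 256) := by
        calc (2 ^ i.val) &&& (-e - 1).toNat = (-e - 1).toNat &&& 2 ^ i.val := Nat.and_comm _ _
          _ = ((-e - 1).toNat &&& 255) &&& 2 ^ i.val := (land_mask _ _ hlt).symm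
          _ = ((-e - 1).toNat % 256) &&& 2 ^ i.val := by rw [land_255_small]
          _ = (2 ^ i.val) &&& ((-e - 1).toNat % 256) := Nat.and_comm _ _
      rw [hm]
      exact neg_case_bits ⟨(-e - 1).toNat % 256, Nat.mod_lt _ (by norm_num)⟩ i

-- the core equality, exhaustively over the residue
set_option maxRecDepth 100000 in
theorem core_eq : ∀ k : Fin 256,
    ([((1 : Int), "LORA"), (2, "SD"), (4, "RTC"), (8, "BARO"),
      (16, "IMU"), (32, "ADXL"), (64, "GPS"), (128, "BAT")].filterMap
      (fun bl => if PySem.Int.band (k.val : Int) bl.1 ≠ 0 then some bl.2 else none))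
      = bLoop 8 ((k.val : Int)) [] := by decide

-- ===== VERDICT (by name: the statement is the Claim_ definition above) =====
theorem decode_error_spec : Claim_equal_decode_error := by
  intro err _
  unfold Spec_decode_error decode_error decode_error_alt
  match err with
  | none => rfl
  | some e =>
    by_cases he : e = 0
    · simp [he]
    · simp only [he, if_false]
      obtain ⟨k, hk, h255, hbit⟩ := band_reduce e
      have h1 := hbit ⟨0, by norm_num⟩
      have h2 := hbit ⟨1, by norm_num⟩
      have h4 := hbit ⟨2, by norm_num⟩
      have h8 := hbit ⟨3, by norm_num⟩
      have h16 := hbit ⟨4, by norm_num⟩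
      have h32 := hbit ⟨5, by norm_num⟩
      have h64 := hbit ⟨6, by norm_num⟩
      have h128 := hbit ⟨7, by norm_num⟩
      norm_num at h1 h2 h4 h8 h16 h32 h64 h128
      have hcore := core_eq ⟨k, hk⟩
      simp only [List.filterMap_cons, List.filterMap_nil] at hcore ⊢
      rw [h255, h1, h2, h4, h8, h16, h32, h64, h128, hcore]
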